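-- pv_equiv track=rewrite | github.com/heldstephan/jpt-amz | scripts/build_TSPLIB.py | extractSuperPredEdges
-- ===== SOURCE A (Python) =====
-- def extractSuperPredEdges(sorder, superList):
--     predEdges = []
--     for i in range(len(sorder)-1):
--         a = sorder[i]
--         b = sorder[i+1]
--         if a in superList and b in superList:
--             if sorder.count(a) == 1 and sorder.count(b) == 1:
--                 predEdges.append([superList.index(a),
--                                   superList.index(b)])
--     return predEdges
-- ===== SOURCE B (Python) =====
-- def extractSuperPredEdges(sorder, superList):
--     # duplicates of sorder found by sorting and scanning adjacent equal pairs
--     srt = sorted(sorder)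
--     dup = set()
--     for x, y in zip(srt, srt[1:]):
--         if x == y:
--             dup.add(x)
--     first = {}
--     for i, v in enumerate(superList):
--         first.setdefault(v, i)
--     # map each element to its super-node index, or None if duplicated/absent
--     mapped = [None if x in dup else first.get(x) for x in sorder]
--     return [[p, q] for p, q in zip(mapped, mapped[1:])
--             if p is not None and q is not None]
-- ===== Notes on version B (the rewrite author's own statement) =====
-- stated objective: faster
-- what changed: B stages the work differently: duplicates are detected by sorting sorder and scanning adjacent equal pairs, superList first-indices are built once with setdefault, each element is mapped to an optional index, and edges are the adjacent pairs of two mapped indices - no per-edge count/index/'in' scans as in A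
import Mathlib
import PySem

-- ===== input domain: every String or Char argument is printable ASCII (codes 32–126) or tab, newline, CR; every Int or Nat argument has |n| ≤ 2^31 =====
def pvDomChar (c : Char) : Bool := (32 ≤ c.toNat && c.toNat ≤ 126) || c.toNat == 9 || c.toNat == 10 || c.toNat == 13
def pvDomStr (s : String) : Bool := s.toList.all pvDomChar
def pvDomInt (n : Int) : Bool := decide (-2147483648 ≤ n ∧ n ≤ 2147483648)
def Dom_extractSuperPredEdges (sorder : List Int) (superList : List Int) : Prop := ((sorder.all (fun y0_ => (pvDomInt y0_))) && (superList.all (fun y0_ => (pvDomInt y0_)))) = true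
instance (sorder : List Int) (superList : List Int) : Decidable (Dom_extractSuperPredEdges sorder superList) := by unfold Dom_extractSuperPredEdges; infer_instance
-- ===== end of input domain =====

-- B replaces A's per-edge count/index/'in' scans by three staged passes: sort-and-scan for duplicates, a first-index dict, a map to optional indices, then pairwise collection (faster).


-- ===== PORT A =====
def extractSuperPredEdges (sorder : List Int) (superList : List Int) : List (List Int) :=
  (PySem.List.pyRange 0 ((sorder.length : Int) - 1) 1).foldl
    (fun predEdges i =>
      match PySem.List.pyGet? sorder i, PySem.List.pyGet? sorder (i + 1) with
      | some a, some b =>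
        if superList.contains a && superList.contains b then
          if PySem.List.count sorder a == 1 && PySem.List.count sorder b == 1 then
            predEdges ++ [[(((PySem.List.index? superList a).getD 0 : Nat) : Int),
                           (((PySem.List.index? superList b).getD 0 : Nat) : Int)]]
          else predEdges
        else predEdges
      | _, _ => predEdges) []

-- ===== PORT B =====
-- duplicates of sorder: sort, then scan adjacent equal pairs
def pvDups (sorder : List Int) : PySem.Set Int :=
  let srt := PySem.List.sorted sorder (fun x => x) false
  (srt.zip srt.tail).foldl
    (fun s p => if p.1 == p.2 then PySem.Set.add s p.1 else s) PySem.Set.empty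

-- first.setdefault(v, i) over enumerate(superList)
def pvFirst (superList : List Int) : PySem.Dict Int Int :=
  (PySem.List.enumerate superList 0).foldl
    (fun d p => d.setdefault p.2 p.1) PySem.Dict.empty

def extractSuperPredEdges_alt (sorder : List Int) (superList : List Int) : List (List Int) :=
  let dup := pvDups sorder
  let first := pvFirst superList
  let mapped := sorder.map (fun x => if PySem.Set.contains dup x then none else first.get? x)
  (mapped.zip mapped.tail).filterMap (fun p =>
    p.1.bind (fun i => p.2.map (fun j => [i, j])))

-- ===== PRECONDITION & SPEC =====
def Spec_extractSuperPredEdges (sorder : List Int) (superList : List Int) (out : List (List Int)) : Prop := out = extractSuperPredEdges_alt sorder superList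
instance (sorder : List Int) (superList : List Int) (out : List (List Int)) : Decidable (Spec_extractSuperPredEdges sorder superList out) := by unfold Spec_extractSuperPredEdges; infer_instance

-- ===== CLAIM (what is proved, stated in full; the proofs are below) =====
def Claim_equal_extractSuperPredEdges : Prop := ∀ (sorder : List Int) (superList : List Int), Dom_extractSuperPredEdges sorder superList → Spec_extractSuperPredEdges sorder superList (extractSuperPredEdges sorder superList)

-- ===== LEMMAS AND PROOFS =====

-- setdefault is the contains/insert conditional
theorem pvSetdefault_eq (d : PySem.Dict Int Int) (k v : Int) :
    d.setdefault k v = if d.contains k then d else d.insert k v := by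
  simp only [PySem.Dict.setdefault, PySem.Dict.insert, PySem.Dict.contains]
  split_ifs with h <;> simp [h]

-- the first-index dict looked up at v is the first index of v in l (shifted by the enumerate start)
theorem pvFirst_aux_get? (l : List Int) : ∀ (s : Int) (d : PySem.Dict Int Int) (v : Int),
    ((PySem.List.enumerate l s).foldl
      (fun d p => if d.contains p.2 then d else d.insert p.2 p.1) d).get? v
    = if d.contains v then d.get? v
      else (PySem.List.index? l v).map (fun n => s + (n : Int)) := by
  induction l with
  | nil =>
    intro s d v
    simp only [PySem.List.enumerate_nil, List.foldl_nil]
    by_cases hc : d.contains v = true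
    · simp [hc]
    · simp only [Bool.not_eq_true] at hc
      rw [PySem.Dict.contains_eq_isSome_get?] at hc
      cases h : d.get? v with
      | none => simp [PySem.List.index?_eq_idxOf?]
      | some w => rw [h] at hc; simp at hc
  | cons x xs ih =>
    intro s d v
    rw [PySem.List.enumerate_cons]
    simp only [List.foldl_cons]
    rw [ih]
    by_cases hv : v = x
    · subst hv
      rw [PySem.List.index?_cons_self]
      by_cases hc : d.contains v = true
      · simp [hc]
      · simp only [Bool.not_eq_true] at hc
        simp [hc, PySem.Dict.contains_insert_self, PySem.Dict.get?_insert_self]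
    · rw [PySem.List.index?_cons_of_ne xs (Ne.symm hv)]
      have hco : (d.insert x s).contains v = (v == x || d.contains v) :=
        PySem.Dict.contains_insert d x v s
      by_cases hc : d.contains x = true
      · simp only [hc, if_true]
        by_cases hd : d.contains v = true
        · simp [hd]
        · simp only [Bool.not_eq_true] at hd
          simp only [hd, if_false, Bool.false_eq_true]
          cases h : PySem.List.index? xs v with
          | none => simp
          | some n => simp; omega
      · simp only [hc, if_false, Bool.false_eq_true]
        rw [hco, PySem.Dict.get?_insert_of_ne _ _ hv]
        have : (v == x) = false := by simp [hv]
        simp only [this, Bool.false_or]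
        by_cases hd : d.contains v = true
        · simp [hd]
        · simp only [Bool.not_eq_true] at hd
          simp only [hd, if_false, Bool.false_eq_true]
          cases h : PySem.List.index? xs v with
          | none => simp
          | some n => simp; omega

theorem pvFirst_get? (l : List Int) (v : Int) :
    (pvFirst l).get? v = (PySem.List.index? l v).map (fun n => (n : Int)) := by
  unfold pvFirst
  have hb : (fun (d : PySem.Dict Int Int) (p : Int × Int) => d.setdefault p.2 p.1)
      = (fun d p => if d.contains p.2 then d else d.insert p.2 p.1) := by
    funext d p; exact pvSetdefault_eq d p.2 p.1
  rw [hb, pvFirst_aux_get? l 0 PySem.Dict.empty v]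
  simp [PySem.Dict.contains_empty]

-- adjacent equal pairs of a ≤-sorted list are exactly the values occurring more than once
theorem pvDupPairs (l : List Int) (h : l.Pairwise (· ≤ ·)) (x : Int) :
    (x ∈ ((l.zip l.tail).filter (fun p => p.1 == p.2)).map (·.1)) ↔ 1 < l.count x := by
  induction l with
  | nil => simp
  | cons a t ih =>
    cases t with
    | nil =>
      have hle : List.count x [a] ≤ [a].length := List.count_le_length
      simp at hle ⊢
      omega
    | cons b t2 =>
      have hp2 : (b :: t2).Pairwise (· ≤ ·) := h.tail
      have hab : a ≤ b := (List.pairwise_cons.mp h).1 b (List.mem_cons_self)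
      have hzip : (a :: b :: t2).zip (a :: b :: t2).tail
          = (a, b) :: ((b :: t2).zip (b :: t2).tail) := rfl
      rw [hzip]
      by_cases hx : x = a
      · subst hx
        by_cases heq : x = b
        · subst heq
          simp only [List.filter_cons, List.map_cons, List.mem_cons, List.count_cons]
          simp
        · have hnotmem : x ∉ (b :: t2) := by
            intro hmem
            rcases List.mem_cons.mp hmem with h1 | h2
            · exact heq h1
            · have hbt : ∀ y ∈ t2, b ≤ y := (List.pairwise_cons.mp hp2).1
              have := hbt x h2
              omega
          have hcount0 : (b :: t2).count x = 0 := List.count_eq_zero.mpr hnotmem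
          have hbeq : ((x, b).1 == (x, b).2) = false := by simp [heq]
          simp only [List.filter_cons, hbeq, Bool.false_eq_true, if_false]
          rw [ih hp2, hcount0]
          simp [List.count_cons, hcount0]
      · have hcnt : (a :: b :: t2).count x = (b :: t2).count x :=
          List.count_cons_of_ne (Ne.symm hx)
        rw [hcnt, ← ih hp2]
        by_cases heq : a = b
        · subst heq
          simp [List.filter_cons, hx]
        · have hbeq : ((a, b).1 == (a, b).2) = false := by simp [heq]
          simp [List.filter_cons, hbeq]

-- membership in the duplicate set is 'count > 1'
theorem pvDups_mem (sorder : List Int) (x : Int) :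
    x ∈ pvDups sorder ↔ 1 < sorder.count x := by
  unfold pvDups
  rw [PySem.List.foldl_if_eq_foldl_filter]
  have hfm : ∀ (z : List (Int × Int)),
      z.foldl (fun s p => PySem.Set.add s p.1) PySem.Set.empty
      = PySem.Set.ofList (z.map (fun p : Int × Int => p.1)) := by
    intro z
    rw [PySem.Set.ofList_eq_foldl, List.foldl_map]
    rfl
  rw [hfm, PySem.Set.mem_ofList]
  have hsrt := PySem.List.sorted_pairwise sorder (fun x => x)
  rw [pvDupPairs _ hsrt x]
  have := (PySem.List.sorted_perm sorder (fun x => x) false).count_eq x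
  omega

theorem pvDups_contains (sorder : List Int) (x : Int) :
    PySem.Set.contains (pvDups sorder) x = decide (1 < sorder.count x) := by
  have : PySem.Set.contains (pvDups sorder) x = decide (x ∈ pvDups sorder) := by
    simp [PySem.Set.contains, List.contains_eq_mem]
  rw [this]
  simp [pvDups_mem]

-- fold over range(len(xs)-1) reading xs[k], xs[k+1] = fold over adjacent pairs
theorem pvAdjFold (g : List (List Int) → Int → Int → List (List Int)) :
    ∀ (xs : List Int) (init : List (List Int)),
    (List.range (xs.length - 1)).foldl
      (fun acc k => match xs[k]?, xs[k+1]? with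
        | some a, some b => g acc a b
        | _, _ => acc) init
    = (xs.zip xs.tail).foldl (fun acc p => g acc p.1 p.2) init := by
  intro xs
  induction xs with
  | nil => intro init; rfl
  | cons x xs ih =>
    intro init
    cases xs with
    | nil => rfl
    | cons y rest =>
      have hlen : (x :: y :: rest).length - 1 = (y :: rest).length - 1 + 1 := by
        simp
      rw [hlen, List.range_succ_eq_map, List.foldl_cons, List.foldl_map]
      show (List.range ((y :: rest).length - 1)).foldl
        (fun acc k => match (y :: rest)[k]?, (y :: rest)[k+1]? with
          | some a, some b => g acc a b
          | _, _ => acc) (g init x y)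
        = _
      rw [ih (g init x y)]
      rfl

-- A's fold body, index-free form
theorem pvA_eq_rangeFold (sorder superList : List Int) :
    extractSuperPredEdges sorder superList
    = (List.range (sorder.length - 1)).foldl
      (fun acc k => match sorder[k]?, sorder[k+1]? with
        | some a, some b =>
          if superList.contains a && superList.contains b then
            if PySem.List.count sorder a == 1 && PySem.List.count sorder b == 1 then
              acc ++ [[(((PySem.List.index? superList a).getD 0 : Nat) : Int),
                       (((PySem.List.index? superList b).getD 0 : Nat) : Int)]]
            else acc
          else acc
        | _, _ => acc) [] := by
  unfold extractSuperPredEdges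
  rw [PySem.List.pyRange_one]
  have hcast : ((sorder.length : Int) - 1 - 0).toNat = sorder.length - 1 := by omega
  rw [hcast, List.foldl_map]
  congr 1
  funext acc k
  have h1 : PySem.List.pyGet? sorder ((0 : Int) + (k : Int)) = sorder[k]? := by
    rw [zero_add]; exact PySem.List.pyGet?_natCast sorder k
  have h2 : PySem.List.pyGet? sorder ((0 : Int) + (k : Int) + 1) = sorder[k+1]? := by
    have : (0 : Int) + (k : Int) + 1 = ((k + 1 : Nat) : Int) := by push_cast; ring
    rw [this]; exact PySem.List.pyGet?_natCast sorder (k + 1)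
  rw [h1, h2]

-- the per-pair emission of the two programs agrees on pairs drawn from sorder
theorem pvPointwise (sorder superList : List Int) (a b : Int)
    (ha : a ∈ sorder) (hb : b ∈ sorder) :
    (if superList.contains a && superList.contains b then
      if PySem.List.count sorder a == 1 && PySem.List.count sorder b == 1 then
        [[(((PySem.List.index? superList a).getD 0 : Nat) : Int),
          (((PySem.List.index? superList b).getD 0 : Nat) : Int)]]
      else []
     else [])
    = ((if PySem.Set.contains (pvDups sorder) a then none else (pvFirst superList).get? a).bind
        (fun i => (if PySem.Set.contains (pvDups sorder) b then none
          else (pvFirst superList).get? b).map (fun j => [i, j]))).toList := by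
  have hca : 1 ≤ sorder.count a := List.one_le_count_iff.mpr ha
  have hcb : 1 ≤ sorder.count b := List.one_le_count_iff.mpr hb
  rw [pvDups_contains, pvDups_contains, pvFirst_get?, pvFirst_get?,
      PySem.List.count_eq, PySem.List.count_eq]
  by_cases hda : 1 < sorder.count a <;> by_cases hdb : 1 < sorder.count b <;>
    cases hia : PySem.List.index? superList a <;> cases hib : PySem.List.index? superList b
  all_goals (
    try have h3 : a ∉ superList := (PySem.List.index?_eq_none_iff (xs := superList) (v := a)).mp hia
    try have h3 : a ∈ superList := (PySem.List.index?_isSome_iff superList a).mp (by rw [hia]; rfl)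
    try have h4 : b ∉ superList := (PySem.List.index?_eq_none_iff (xs := superList) (v := b)).mp hib
    try have h4 : b ∈ superList := (PySem.List.index?_isSome_iff superList b).mp (by rw [hib]; rfl)
    try have h1 : sorder.count a = 1 := by omega
    try have h1 : sorder.count a ≠ 1 := by omega
    try have h2 : sorder.count b = 1 := by omega
    try have h2 : sorder.count b ≠ 1 := by omega
    simp [hia, hib, hda, hdb, h1, h2, h3, h4, List.contains_eq_mem])

-- ===== VERDICT (by name: the statement is the Claim_ definition above) =====
theorem extractSuperPredEdges_spec : Claim_equal_extractSuperPredEdges := by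
  intro sorder superList _
  unfold Spec_extractSuperPredEdges extractSuperPredEdges_alt
  show _ = ((sorder.map (fun x => if PySem.Set.contains (pvDups sorder) x then none
        else (pvFirst superList).get? x)).zip
      (sorder.map (fun x => if PySem.Set.contains (pvDups sorder) x then none
        else (pvFirst superList).get? x)).tail).filterMap
      (fun p => p.1.bind (fun i => p.2.map (fun j => [i, j])))
  rw [pvA_eq_rangeFold, pvAdjFold]
  -- B as a flatMap over the adjacent pairs of sorder
  have hmapzip :
      ((sorder.map (fun x => if PySem.Set.contains (pvDups sorder) x then none
          else (pvFirst superList).get? x)).zip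
       (sorder.map (fun x => if PySem.Set.contains (pvDups sorder) x then none
          else (pvFirst superList).get? x)).tail)
      = (sorder.zip sorder.tail).map (Prod.map
          (fun x => if PySem.Set.contains (pvDups sorder) x then none
            else (pvFirst superList).get? x)
          (fun x => if PySem.Set.contains (pvDups sorder) x then none
            else (pvFirst superList).get? x)) := by
    rw [← List.map_tail, List.zip_map]
  rw [hmapzip, List.filterMap_map, List.filterMap_eq_flatMap_toList]
  -- A as a flatMap over the same pairs
  have hA : (sorder.zip sorder.tail).foldl
      (fun acc p =>
        if superList.contains p.1 && superList.contains p.2 then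
          if PySem.List.count sorder p.1 == 1 && PySem.List.count sorder p.2 == 1 then
            acc ++ [[(((PySem.List.index? superList p.1).getD 0 : Nat) : Int),
                     (((PySem.List.index? superList p.2).getD 0 : Nat) : Int)]]
          else acc
        else acc) []
      = (sorder.zip sorder.tail).flatMap (fun p =>
          if superList.contains p.1 && superList.contains p.2 then
            if PySem.List.count sorder p.1 == 1 && PySem.List.count sorder p.2 == 1 then
              [[(((PySem.List.index? superList p.1).getD 0 : Nat) : Int),
                (((PySem.List.index? superList p.2).getD 0 : Nat) : Int)]]
            else []
          else []) := by
    have := PySem.List.foldl_append_eq_flatMap (l := sorder.zip sorder.tail)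
      (g := fun p : Int × Int =>
        if superList.contains p.1 && superList.contains p.2 then
          if PySem.List.count sorder p.1 == 1 && PySem.List.count sorder p.2 == 1 then
            [[(((PySem.List.index? superList p.1).getD 0 : Nat) : Int),
              (((PySem.List.index? superList p.2).getD 0 : Nat) : Int)]]
          else []
        else []) (acc := [])
    simp only [List.nil_append] at this
    rw [← this]
    apply PySem.List.foldl_congr_mem
    intro acc p _
    split_ifs <;> simp
  rw [hA]
  apply List.flatMap_congr
  intro p hp
  have hmem := List.of_mem_zip hp
  have hpt := pvPointwise sorder superList p.1 p.2 hmem.1 (List.mem_of_mem_tail hmem.2)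
  simpa [Function.comp, Prod.map] using hpt
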